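-- pv_equiv track=rewrite | github.com/kaist-ina/NAS_public | ops.py | random_gradual_03
-- ===== SOURCE A (Python) =====
-- def random_gradual_03(elem_list):
--     random_list = []
--
--     if len(elem_list) == 1:
--         random_list.extend([elem_list[0]])
--     else:
--         for i in range(len(elem_list)):
--             if i == len(elem_list) - 1:
--                 random_list.extend([elem_list[i]] * len(random_list))
--             else:
--                 random_list.extend([elem_list[i]] *  1)
--
--     return random_list
-- ===== SOURCE B (Python) =====
-- def random_gradual_03(elem_list):
--     n = len(elem_list)
--     if n == 0:
--         return []
--     if n == 1:
--         return [elem_list[0]]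
--     return list(elem_list[:-1]) + [elem_list[-1]] * (n - 1)
-- ===== Notes on version B (the rewrite author's own statement) =====
-- stated objective: simpler
-- what changed: Replaces the indexed loop with its last-index branch and per-element appends by a direct construction: the list without its last element concatenated with the last element repeated, plus explicit guards for the empty and singleton cases.
import Mathlib
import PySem

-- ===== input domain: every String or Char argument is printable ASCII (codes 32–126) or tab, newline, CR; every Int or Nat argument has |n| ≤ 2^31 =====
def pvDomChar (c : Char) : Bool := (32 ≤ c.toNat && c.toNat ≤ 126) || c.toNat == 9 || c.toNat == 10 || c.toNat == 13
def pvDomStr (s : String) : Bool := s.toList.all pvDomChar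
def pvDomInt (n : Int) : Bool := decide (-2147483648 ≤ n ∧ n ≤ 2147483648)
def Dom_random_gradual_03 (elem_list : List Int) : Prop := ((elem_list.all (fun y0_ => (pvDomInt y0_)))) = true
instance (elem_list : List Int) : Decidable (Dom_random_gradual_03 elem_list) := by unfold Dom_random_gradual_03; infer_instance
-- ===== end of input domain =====

-- B replaces A's indexed loop (append each element, then extend by last*len) with a direct
-- construction: elem_list[:-1] ++ [last] * (n-1), with guards for n = 0 and n = 1 (simpler).

-- ===== PORT A =====
def random_gradual_03 (elem_list : List Int) : List Int :=
  if elem_list.length == 1 then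
    ([] : List Int) ++ [PySem.List.pyGetD elem_list 0 0]
  else
    (PySem.List.pyRange 0 (elem_list.length : Int) 1).foldl
      (fun acc i =>
        if i == (elem_list.length : Int) - 1 then
          acc ++ List.replicate acc.length (PySem.List.pyGetD elem_list i 0)
        else
          acc ++ [PySem.List.pyGetD elem_list i 0]) []

-- ===== PORT B =====
def random_gradual_03_alt (elem_list : List Int) : List Int :=
  let n := elem_list.length
  if n = 0 then []
  else if n = 1 then [PySem.List.pyGetD elem_list 0 0]
  else PySem.List.slice elem_list none (some (-1)) ++
       List.replicate (n - 1) (PySem.List.pyGetD elem_list (-1) 0)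

-- ===== PRECONDITION & SPEC =====
def Spec_random_gradual_03 (elem_list : List Int) (out : List Int) : Prop := out = random_gradual_03_alt elem_list
instance (elem_list : List Int) (out : List Int) : Decidable (Spec_random_gradual_03 elem_list out) := by unfold Spec_random_gradual_03; infer_instance

-- ===== CLAIM (what is proved, stated in full; the proofs are below) =====
def Claim_equal_random_gradual_03 : Prop := ∀ (elem_list : List Int), Dom_random_gradual_03 elem_list → Spec_random_gradual_03 elem_list (random_gradual_03 elem_list)

-- ===== LEMMAS AND PROOFS =====
theorem random_gradual_03_eq_alt (l : List Int) :
    random_gradual_03 l = random_gradual_03_alt l := by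
  rcases l with _ | ⟨x, _ | ⟨y, t⟩⟩
  · simp [random_gradual_03, random_gradual_03_alt, PySem.List.pyRange]
  · simp [random_gradual_03, random_gradual_03_alt]
  · set l := x :: y :: t with hl
    have hn : l.length = t.length + 2 := by simp [hl]
    have h1 : ((l.length : Int)) = ((l.length - 1 : Nat) : Int) + 1 := by omega
    have hrange : PySem.List.pyRange 0 (l.length : Int) 1 =
        PySem.List.pyRange 0 ((l.length - 1 : Nat) : Int) 1 ++ [((l.length - 1 : Nat) : Int)] := by
      rw [h1, PySem.List.pyRange_one_succ_right (by positivity)]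
    have hmap : ∀ j ∈ PySem.List.pyRange 0 ((l.length - 1 : Nat) : Int) 1,
        PySem.List.pyGetD l j 0 = PySem.List.pyGetD l.dropLast j 0 := by
      intro j hj
      rw [PySem.List.mem_pyRange_one] at hj
      rw [PySem.List.pyGetD_eq_getElem l 0 hj.1 (by omega),
          PySem.List.pyGetD_eq_getElem l.dropLast 0 hj.1 (by simp; omega)]
      simp [List.getElem_dropLast]
    have hpre : (PySem.List.pyRange 0 ((l.length - 1 : Nat) : Int) 1).foldl
        (fun acc i =>
          if i == (l.length : Int) - 1 then
            acc ++ List.replicate acc.length (PySem.List.pyGetD l i 0)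
          else
            acc ++ [PySem.List.pyGetD l i 0]) [] = l.dropLast := by
      rw [PySem.List.foldl_congr_mem _ _ (fun acc i => acc ++ [PySem.List.pyGetD l i 0]) _
        (by intro acc j hj; rw [PySem.List.mem_pyRange_one] at hj; simp; intro h; omega)]
      rw [PySem.List.foldl_append_singleton_eq_map, List.nil_append]
      rw [List.map_congr_left hmap]
      have := PySem.List.map_pyGetD_pyRange_zero (xs := l.dropLast) (d := (0:Int))
      simpa [hn] using this
    have hlast : PySem.List.pyGetD l ((l.length - 1 : Nat) : Int) 0 =
        PySem.List.pyGetD l (-1) 0 := by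
      rw [PySem.List.pyGetD_eq_getElem l 0 (by omega) (by omega)]
      rw [show ((-1 : Int)) = -((1:Nat):Int) by simp,
          PySem.List.pyGetD_neg_natCast l 1 0 (by omega) (by omega)]
      simp
    have hne : l.length ≠ 1 := by omega
    have hif : ((l.length - 1 : Nat) : Int) = (l.length : Int) - 1 := by omega
    simp only [random_gradual_03, random_gradual_03_alt]
    rw [hrange, List.foldl_append, hpre]
    simp only [List.foldl_cons, List.foldl_nil, beq_iff_eq, if_pos hif,
      if_neg hne, if_neg (by omega : ¬ l.length = 0)]
    rw [hlast, PySem.List.slice_to_neg_one, List.length_dropLast]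

-- ===== VERDICT (by name: the statement is the Claim_ definition above) =====
theorem random_gradual_03_spec : Claim_equal_random_gradual_03 := by
  intro l _
  exact random_gradual_03_eq_alt l
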